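-- pv_equiv track=rewrite | github.com/hunnam5220/coding_test_study | [나동빈]이것이 코딩 테스트다/09. Solutions/04. Fourth/01. 그리디/04. 만들 수 없는 금액.py | solution
-- ===== SOURCE A (Python) =====
-- def solution(n, money):
--     money.sort()
--     answer = 1
--     for i in money:
--         if i > answer:
--             break
--         else:
--             answer += i
--     return answer
-- ===== SOURCE B (Python) =====
-- def solution(n, money):
--     money.sort()
--     sums = [1]
--     for c in money:
--         sums.append(sums[-1] + c)
--     k = len(money)
--     for i in reversed(range(len(money))):
--         if money[i] > sums[i]:
--             k = i
--     return sums[k]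
-- ===== Notes on version B (the rewrite author's own statement) =====
-- stated objective: alternative
-- what changed: A's single forward greedy pass with a mutable accumulator and an early break is replaced by two full passes: first build the complete prefix-sum table sums (sums[i] = 1 + sum of the first i sorted coins), then scan the indices backwards to find the smallest index whose coin exceeds its table entry, and return that table entry.
import Mathlib
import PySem

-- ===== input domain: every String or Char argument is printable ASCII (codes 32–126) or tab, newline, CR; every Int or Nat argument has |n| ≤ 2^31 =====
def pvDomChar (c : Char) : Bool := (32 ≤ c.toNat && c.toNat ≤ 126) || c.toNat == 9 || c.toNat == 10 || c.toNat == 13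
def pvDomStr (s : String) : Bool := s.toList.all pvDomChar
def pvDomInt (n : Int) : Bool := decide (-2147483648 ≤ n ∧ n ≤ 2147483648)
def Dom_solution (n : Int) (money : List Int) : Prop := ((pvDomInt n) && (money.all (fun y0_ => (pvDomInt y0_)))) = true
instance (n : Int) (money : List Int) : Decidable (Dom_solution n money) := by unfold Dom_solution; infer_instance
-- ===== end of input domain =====

-- B replaces A's single greedy accumulator-with-break by two full passes (build the whole
-- prefix-sum table, then a backwards scan for the first violating index); same return value,
-- same in-place sort of `money` (both A and B sort the argument; equivalence is about the return value).

-- ===== PORT A =====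
-- the for-loop with `break`: state is `answer`
def solGo : List Int → Int → Int
  | [], answer => answer
  | i :: rest, answer => if i > answer then answer else solGo rest (answer + i)

def solution (n : Int) (money : List Int) : Int :=
  solGo (PySem.List.sorted money (fun x => x) false) 1

-- ===== PORT B =====
def solution_alt (n : Int) (money : List Int) : Int :=
  let m := PySem.List.sorted money (fun x => x) false
  -- sums = [1]; for c in m: sums.append(sums[-1] + c)
  let sums := m.foldl (fun s c => s ++ [(PySem.List.pyGet? s (-1)).getD 0 + c]) [1]
  -- k = len(m); for i in reversed(range(len(m))): if m[i] > sums[i]: k = i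
  -- (indices i come from range(len(m)), so m[i] / sums[i] are in range: ported as getD)
  let k := ((List.range m.length).reverse).foldl
      (fun k i => if m.getD i 0 > sums.getD i 0 then i else k) m.length
  sums.getD k 0

-- ===== PRECONDITION & SPEC =====
def Spec_solution (n : Int) (money : List Int) (out : Int) : Prop := out = solution_alt n money
instance (n : Int) (money : List Int) (out : Int) : Decidable (Spec_solution n money out) := by unfold Spec_solution; infer_instance

-- ===== CLAIM (what is proved, stated in full; the proofs are below) =====
def Claim_equal_solution : Prop := ∀ (n : Int) (money : List Int), Dom_solution n money → Spec_solution n money (solution n money)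

-- ===== LEMMAS AND PROOFS =====

-- the prefix-sum table B builds
def pvScan : Int → List Int → List Int
  | a, [] => [a]
  | a, c :: t => a :: pvScan (a + c) t

theorem pv_scan_fold (m : List Int) : ∀ (p : List Int) (a : Int),
    m.foldl (fun s c => s ++ [(PySem.List.pyGet? s (-1)).getD 0 + c]) (p ++ [a])
      = p ++ pvScan a m := by
  induction m with
  | nil => intro p a; simp [pvScan]
  | cons c t ih =>
      intro p a
      simp only [List.foldl_cons, PySem.List.pyGet?_neg_one_append_singleton, Option.getD_some]
      rw [show p ++ [a] ++ [a + c] = (p ++ [a]) ++ [a + c] from rfl, ih (p ++ [a]) (a + c)]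
      simp [pvScan]

theorem pv_foldr_shift (r : List Nat) (p : Nat → Prop) [DecidablePred p] (n : Nat) :
    r.foldr (fun i k => if p i then i + 1 else k) (n + 1)
      = (r.foldr (fun i k => if p i then i else k) n) + 1 := by
  induction r with
  | nil => rfl
  | cons i t ih => simp only [List.foldr_cons, ih]; split_ifs <;> rfl

theorem pv_main (m : List Int) : ∀ a : Int,
    (pvScan a m).getD
      ((List.range m.length).foldr
        (fun i k => if m.getD i 0 > (pvScan a m).getD i 0 then i else k) m.length) 0
      = solGo m a := by
  induction m with
  | nil => intro a; simp [pvScan, solGo]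
  | cons c t ih =>
      intro a
      simp only [pvScan, solGo, List.length_cons, List.range_succ_eq_map, List.foldr_cons,
        List.foldr_map, List.getD_cons_succ, List.getD_cons_zero]
      rw [pv_foldr_shift (List.range t.length)
            (fun i => t.getD i 0 > (pvScan (a + c) t).getD i 0) t.length]
      split_ifs with h
      · simp
      · simpa using ih (a + c)

-- ===== VERDICT (by name: the statement is the Claim_ definition above) =====
theorem pv_scan_fold0 (m : List Int) :
    m.foldl (fun s c => s ++ [(PySem.List.pyGet? s (-1)).getD 0 + c]) [1] = pvScan 1 m :=
  pv_scan_fold m [] 1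

theorem solution_spec : Claim_equal_solution := by
  unfold Claim_equal_solution
  intro n money _
  unfold Spec_solution solution solution_alt
  simp only [pv_scan_fold0, List.foldl_reverse]
  exact (pv_main (PySem.List.sorted money (fun x => x) false) 1).symm
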